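-- pv_equiv track=rewrite | github.com/cnsimmons/long_pt | B_analyses/05_searchlight_decoding/searchlight_decoding_longitudinal.py | create_searchlight_sphere_indices
-- ===== SOURCE A (Python) =====
-- def create_searchlight_sphere_indices(shape, center, radius_voxels):
--     """Create indices for a sphere centered at a voxel"""
--     indices = []
--     for x in range(-radius_voxels, radius_voxels + 1):
--         for y in range(-radius_voxels, radius_voxels + 1):
--             for z in range(-radius_voxels, radius_voxels + 1):
--                 if x**2 + y**2 + z**2 <= radius_voxels**2:
--                     new_x = center[0] + x
--                     new_y = center[1] + y
--                     new_z = center[2] + z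
--                     if (0 <= new_x < shape[0] and
--                         0 <= new_y < shape[1] and
--                         0 <= new_z < shape[2]):
--                         indices.append((new_x, new_y, new_z))
--     return indices
-- ===== SOURCE B (Python) =====
-- import math
--
--
-- def _axis(size, c, m):
--     """Grid coordinates at distance at most m from c, clipped to [0, size)."""
--     return range(max(0, c - m), min(size, c + m + 1))
--
--
-- def create_searchlight_sphere_indices(shape, center, radius_voxels):
--     """Create indices for a sphere centered at a voxel.
--
--     Enumerates the clipped grid coordinates directly: per-axis bounds are
--     derived with math.isqrt and intersected with the grid, so no sphere test
--     and no bounds test is ever performed on an individual voxel."""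
--     r2 = radius_voxels * radius_voxels
--     return [
--         (nx, ny, nz)
--         for nx in _axis(shape[0], center[0], radius_voxels)
--         for ny in _axis(shape[1], center[1],
--                         math.isqrt(r2 - (nx - center[0]) ** 2))
--         for nz in _axis(shape[2], center[2],
--                         math.isqrt(r2 - (nx - center[0]) ** 2
--                                    - (ny - center[1]) ** 2))
--     ]
-- ===== Notes on version B (the rewrite author's own statement) =====
-- stated objective: alternative
-- what changed: A scans the whole (2r+1)^3 offset cube and tests every cell against the sphere and the grid bounds; B instead iterates over the clipped grid coordinates themselves, deriving each axis range arithmetically (math.isqrt for the sphere bound, max/min for the grid clip) and building the result with a nested comprehension, so no per-voxel test is performed at all.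
import Mathlib
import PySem

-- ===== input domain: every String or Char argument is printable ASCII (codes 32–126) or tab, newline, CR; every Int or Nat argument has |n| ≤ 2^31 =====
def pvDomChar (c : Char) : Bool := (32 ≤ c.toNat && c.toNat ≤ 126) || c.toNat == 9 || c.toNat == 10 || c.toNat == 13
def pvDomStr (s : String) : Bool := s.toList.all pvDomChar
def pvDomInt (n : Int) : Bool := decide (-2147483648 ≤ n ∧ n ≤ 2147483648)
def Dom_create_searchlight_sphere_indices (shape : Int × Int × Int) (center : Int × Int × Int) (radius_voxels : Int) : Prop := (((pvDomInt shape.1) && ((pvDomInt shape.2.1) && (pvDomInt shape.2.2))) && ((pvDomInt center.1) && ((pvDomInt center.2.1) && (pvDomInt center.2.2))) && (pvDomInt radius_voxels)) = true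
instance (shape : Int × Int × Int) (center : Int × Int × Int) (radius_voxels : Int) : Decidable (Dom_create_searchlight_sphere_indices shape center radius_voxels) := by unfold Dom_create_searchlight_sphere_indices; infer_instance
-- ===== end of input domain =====

-- B enumerates the clipped grid coordinates directly (per-axis bounds from isqrt
-- intersected with the grid via max/min), instead of A's full-cube offset scan with
-- per-voxel sphere and bounds tests: an alternative enumeration of the same list.


-- ===== PORT A =====
def create_searchlight_sphere_indices (shape : Int × Int × Int) (center : Int × Int × Int) (radius_voxels : Int) : List (Int × Int × Int) :=
  (PySem.List.pyRange (-radius_voxels) (radius_voxels + 1) 1).foldl (fun indices x =>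
    (PySem.List.pyRange (-radius_voxels) (radius_voxels + 1) 1).foldl (fun indices y =>
      (PySem.List.pyRange (-radius_voxels) (radius_voxels + 1) 1).foldl (fun indices z =>
        if x ^ 2 + y ^ 2 + z ^ 2 ≤ radius_voxels ^ 2 then
          let new_x := center.1 + x
          let new_y := center.2.1 + y
          let new_z := center.2.2 + z
          if 0 ≤ new_x ∧ new_x < shape.1 ∧ 0 ≤ new_y ∧ new_y < shape.2.1 ∧ 0 ≤ new_z ∧ new_z < shape.2.2 then
            indices ++ [(new_x, new_y, new_z)]
          else indices
        else indices) indices) indices) []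

-- ===== PORT B =====
-- math.isqrt on a nonnegative int (all arguments B feeds it are nonnegative)
def pyIsqrt (n : Int) : Int := (Nat.sqrt n.toNat : Int)

-- Source B's _axis helper: grid coordinates at distance ≤ m from c, clipped to [0, size)
def pvAxis (size c m : Int) : List Int :=
  PySem.List.pyRange (max 0 (c - m)) (min size (c + m + 1)) 1

def create_searchlight_sphere_indices_alt (shape : Int × Int × Int) (center : Int × Int × Int) (radius_voxels : Int) : List (Int × Int × Int) :=
  let r2 := radius_voxels * radius_voxels
  (pvAxis shape.1 center.1 radius_voxels).flatMap (fun nx =>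
    (pvAxis shape.2.1 center.2.1 (pyIsqrt (r2 - (nx - center.1) ^ 2))).flatMap (fun ny =>
      (pvAxis shape.2.2 center.2.2 (pyIsqrt (r2 - (nx - center.1) ^ 2 - (ny - center.2.1) ^ 2))).map (fun nz =>
        (nx, ny, nz))))

-- ===== PRECONDITION & SPEC =====
def Spec_create_searchlight_sphere_indices (shape : Int × Int × Int) (center : Int × Int × Int) (radius_voxels : Int) (out : List (Int × Int × Int)) : Prop := out = create_searchlight_sphere_indices_alt shape center radius_voxels
instance (shape : Int × Int × Int) (center : Int × Int × Int) (radius_voxels : Int) (out : List (Int × Int × Int)) : Decidable (Spec_create_searchlight_sphere_indices shape center radius_voxels out) := by unfold Spec_create_searchlight_sphere_indices; infer_instance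

-- ===== CLAIM (what is proved, stated in full; the proofs are below) =====
def Claim_equal_create_searchlight_sphere_indices : Prop := ∀ (shape : Int × Int × Int) (center : Int × Int × Int) (radius_voxels : Int), Dom_create_searchlight_sphere_indices shape center radius_voxels → Spec_create_searchlight_sphere_indices shape center radius_voxels (create_searchlight_sphere_indices shape center radius_voxels)

-- ===== LEMMAS AND PROOFS =====

-- foldl with an append-shaped step is init ++ flatMap
theorem pv_foldl_app {α β : Type} (step : List β → α → List β) (h : α → List β)
    (hstep : ∀ a t, step a t = a ++ h t) (l : List α) (a : List β) :
    l.foldl step a = a ++ l.flatMap h := by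
  induction l generalizing a with
  | nil => simp
  | cons x xs ih => simp [List.foldl_cons, hstep, ih, List.append_assoc]

theorem pv_flatMap_congr {α β : Type} {l : List α} {f g : α → List β}
    (h : ∀ x ∈ l, f x = g x) : l.flatMap f = l.flatMap g := by
  induction l with
  | nil => rfl
  | cons x xs ih => simp only [List.flatMap_cons]; rw [h x (by simp), ih (fun y hy => h y (by simp [hy]))]

-- shifting a unit-step range by c
theorem pv_pyRange_shift (a b c : Int) :
    PySem.List.pyRange a b 1 = (PySem.List.pyRange (a - c) (b - c) 1).map (fun t => c + t) := by
  rw [PySem.List.pyRange_one, PySem.List.pyRange_one]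
  have hb : b - c - (a - c) = b - a := by ring
  rw [hb, List.map_map]
  apply List.map_congr_left
  intro k _
  simp only [Function.comp_apply]
  ring

-- characterization of isqrt: for 0 ≤ n, z*z ≤ n ↔ |z| ≤ isqrt n
theorem pv_sq_le_iff (n z : Int) (hn : 0 ≤ n) : z * z ≤ n ↔ -pyIsqrt n ≤ z ∧ z ≤ pyIsqrt n := by
  have h1 : z * z = (z.natAbs * z.natAbs : ℕ) := by
    rw [Int.natCast_mul, Int.natAbs_mul_self']
  have h2 : z * z ≤ n ↔ z.natAbs * z.natAbs ≤ n.toNat := by rw [h1]; omega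
  have h3 : z.natAbs * z.natAbs ≤ Int.toNat n ↔ z.natAbs ≤ Nat.sqrt n.toNat := by
    rw [Nat.le_sqrt', pow_two]
  have h4 : z.natAbs ≤ Nat.sqrt n.toNat ↔ (-pyIsqrt n ≤ z ∧ z ≤ pyIsqrt n) := by
    unfold pyIsqrt; omega
  rw [h2, h3, h4]

theorem pv_isqrt_nonneg (n : Int) : 0 ≤ pyIsqrt n := by unfold pyIsqrt; positivity

theorem pv_isqrt_le (r n : Int) (hr : 0 ≤ r) (h : n ≤ r * r) : pyIsqrt n ≤ r := by
  unfold pyIsqrt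
  have h1 : n.toNat ≤ r.toNat ^ 2 := by
    have : (r.toNat * r.toNat : ℤ) = r * r := by rw [Int.toNat_of_nonneg hr]
    rw [pow_two]; omega
  have h2 : Nat.sqrt n.toNat ≤ Nat.sqrt (r.toNat ^ 2) := Nat.sqrt_le_sqrt h1
  rw [Nat.sqrt_eq'] at h2
  omega

-- restrict a flatMap over [a,b) to a subinterval [lo,hi) outside which F is empty
theorem pv_flatMap_clip {β : Type} (a b lo hi : Int) (hlo : a ≤ lo) (hhi : hi ≤ b)
    (F G : Int → List β)
    (hout : ∀ t, a ≤ t → t < b → (t < lo ∨ hi ≤ t) → F t = [])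
    (hin : ∀ t, lo ≤ t → t < hi → F t = G t) :
    (PySem.List.pyRange a b 1).flatMap F = (PySem.List.pyRange lo hi 1).flatMap G := by
  by_cases h : hi ≤ lo
  · rw [PySem.List.pyRange_one_eq_nil h, List.flatMap_nil]
    apply List.flatMap_eq_nil_iff.mpr
    intro t ht
    rw [PySem.List.mem_pyRange_one] at ht
    apply hout t ht.1 ht.2
    omega
  · push Not at h
    rw [PySem.List.pyRange_one_append a lo b hlo (by omega),
        PySem.List.pyRange_one_append lo hi b (by omega) hhi]
    simp only [List.flatMap_append]
    have h1 : (PySem.List.pyRange a lo 1).flatMap F = [] := by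
      apply List.flatMap_eq_nil_iff.mpr
      intro t ht
      rw [PySem.List.mem_pyRange_one] at ht
      exact hout t ht.1 (by omega) (Or.inl ht.2)
    have h2 : (PySem.List.pyRange hi b 1).flatMap F = [] := by
      apply List.flatMap_eq_nil_iff.mpr
      intro t ht
      rw [PySem.List.mem_pyRange_one] at ht
      exact hout t (by omega) ht.2 (Or.inr ht.1)
    have h3 : (PySem.List.pyRange lo hi 1).flatMap F = (PySem.List.pyRange lo hi 1).flatMap G := by
      apply pv_flatMap_congr
      intro t ht
      rw [PySem.List.mem_pyRange_one] at ht
      exact hin t ht.1 ht.2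
    rw [h1, h2, h3]
    simp

-- the shared innermost body of A: clip to the grid and emit
def pvClip (shape center : Int × Int × Int) (x y z : Int) : List (Int × Int × Int) :=
  let nx := center.1 + x
  let ny := center.2.1 + y
  let nz := center.2.2 + z
  if 0 ≤ nx ∧ nx < shape.1 ∧ 0 ≤ ny ∧ ny < shape.2.1 ∧ 0 ≤ nz ∧ nz < shape.2.2 then
    [(nx, ny, nz)]
  else []

theorem pv_A_flatMap (shape center : Int × Int × Int) (r : Int) :
    create_searchlight_sphere_indices shape center r =
      (PySem.List.pyRange (-r) (r + 1) 1).flatMap (fun x =>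
        (PySem.List.pyRange (-r) (r + 1) 1).flatMap (fun y =>
          (PySem.List.pyRange (-r) (r + 1) 1).flatMap (fun z =>
            if x ^ 2 + y ^ 2 + z ^ 2 ≤ r ^ 2 then pvClip shape center x y z else []))) := by
  unfold create_searchlight_sphere_indices
  have hz : ∀ (x y : Int) (a : List (Int × Int × Int)),
      (PySem.List.pyRange (-r) (r + 1) 1).foldl (fun indices z =>
        if x ^ 2 + y ^ 2 + z ^ 2 ≤ r ^ 2 then
          (if 0 ≤ center.1 + x ∧ center.1 + x < shape.1 ∧ 0 ≤ center.2.1 + y ∧ center.2.1 + y < shape.2.1 ∧ 0 ≤ center.2.2 + z ∧ center.2.2 + z < shape.2.2 then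
            indices ++ [(center.1 + x, center.2.1 + y, center.2.2 + z)] else indices)
        else indices) a
      = a ++ (PySem.List.pyRange (-r) (r + 1) 1).flatMap (fun z =>
          if x ^ 2 + y ^ 2 + z ^ 2 ≤ r ^ 2 then pvClip shape center x y z else []) := by
    intro x y a
    apply pv_foldl_app
    intro acc z
    simp only [pvClip]
    split_ifs <;> simp_all
  have hy : ∀ (x : Int) (a : List (Int × Int × Int)),
      (PySem.List.pyRange (-r) (r + 1) 1).foldl (fun indices y =>
        (PySem.List.pyRange (-r) (r + 1) 1).foldl (fun indices z =>
          if x ^ 2 + y ^ 2 + z ^ 2 ≤ r ^ 2 then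
            (if 0 ≤ center.1 + x ∧ center.1 + x < shape.1 ∧ 0 ≤ center.2.1 + y ∧ center.2.1 + y < shape.2.1 ∧ 0 ≤ center.2.2 + z ∧ center.2.2 + z < shape.2.2 then
              indices ++ [(center.1 + x, center.2.1 + y, center.2.2 + z)] else indices)
          else indices) indices) a
      = a ++ (PySem.List.pyRange (-r) (r + 1) 1).flatMap (fun y =>
          (PySem.List.pyRange (-r) (r + 1) 1).flatMap (fun z =>
            if x ^ 2 + y ^ 2 + z ^ 2 ≤ r ^ 2 then pvClip shape center x y z else [])) := by
    intro x a
    apply pv_foldl_app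
    intro acc y
    exact hz x y acc
  have hx := pv_foldl_app _ _ (fun a x => hy x a) (PySem.List.pyRange (-r) (r + 1) 1) []
  rw [hx]
  simp

-- B as a flatMap over offsets (shift each clipped coordinate range by its center)
theorem pv_B_flatMap (shape center : Int × Int × Int) (r : Int) :
    create_searchlight_sphere_indices_alt shape center r =
      (PySem.List.pyRange (max 0 (center.1 - r) - center.1) (min shape.1 (center.1 + r + 1) - center.1) 1).flatMap (fun x =>
        (PySem.List.pyRange (max 0 (center.2.1 - pyIsqrt (r * r - x * x)) - center.2.1) (min shape.2.1 (center.2.1 + pyIsqrt (r * r - x * x) + 1) - center.2.1) 1).flatMap (fun y =>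
          (PySem.List.pyRange (max 0 (center.2.2 - pyIsqrt (r * r - x * x - y * y)) - center.2.2) (min shape.2.2 (center.2.2 + pyIsqrt (r * r - x * x - y * y) + 1) - center.2.2) 1).flatMap (fun z =>
            [(center.1 + x, center.2.1 + y, center.2.2 + z)]))) := by
  unfold create_searchlight_sphere_indices_alt pvAxis
  rw [pv_pyRange_shift (max 0 (center.1 - r)) (min shape.1 (center.1 + r + 1)) center.1,
      List.flatMap_map]
  apply pv_flatMap_congr
  intro x _
  have ex : center.1 + x - center.1 = x := by ring
  rw [ex]
  have e1 : r * r - x ^ 2 = r * r - x * x := by ring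
  rw [e1]
  rw [pv_pyRange_shift (max 0 (center.2.1 - pyIsqrt (r * r - x * x))) (min shape.2.1 (center.2.1 + pyIsqrt (r * r - x * x) + 1)) center.2.1,
      List.flatMap_map]
  apply pv_flatMap_congr
  intro y _
  have ey : center.2.1 + y - center.2.1 = y := by ring
  rw [ey]
  have e2 : r * r - x * x - y ^ 2 = r * r - x * x - y * y := by ring
  rw [e2]
  rw [pv_pyRange_shift (max 0 (center.2.2 - pyIsqrt (r * r - x * x - y * y))) (min shape.2.2 (center.2.2 + pyIsqrt (r * r - x * x - y * y) + 1)) center.2.2,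
      List.map_map]
  rw [List.map_eq_flatMap]
  rfl

-- ===== VERDICT (by name: the statement is the Claim_ definition above) =====
theorem create_searchlight_sphere_indices_spec : Claim_equal_create_searchlight_sphere_indices := by
  intro shape center r _
  unfold Spec_create_searchlight_sphere_indices
  rw [pv_A_flatMap, pv_B_flatMap]
  apply pv_flatMap_clip (-r) (r + 1)
    (max 0 (center.1 - r) - center.1) (min shape.1 (center.1 + r + 1) - center.1)
    (by rcases max_cases 0 (center.1 - r) with ⟨h, _⟩ | ⟨h, _⟩ <;> omega)
    (by rcases min_cases shape.1 (center.1 + r + 1) with ⟨h, _⟩ | ⟨h, _⟩ <;> omega)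
  · -- x outside the clipped range: the x-clip fails for every (y, z)
    intro x hx1 hx2 hx3
    apply List.flatMap_eq_nil_iff.mpr
    intro y _
    apply List.flatMap_eq_nil_iff.mpr
    intro z _
    have hcx : center.1 + x < 0 ∨ shape.1 ≤ center.1 + x := by
      rcases hx3 with h | h
      · rcases max_cases 0 (center.1 - r) with ⟨he, _⟩ | ⟨he, hge⟩ <;> omega
      · rcases min_cases shape.1 (center.1 + r + 1) with ⟨he, _⟩ | ⟨he, hge⟩ <;> omega
    simp only [pvClip]
    split_ifs <;> first | rfl | omega
  · -- x inside: recurse on y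
    intro x hx1 hx2
    have hcx0 : 0 ≤ center.1 + x := by
      rcases max_cases 0 (center.1 - r) with ⟨he, _⟩ | ⟨he, _⟩ <;> omega
    have hcx1 : center.1 + x < shape.1 := by
      rcases min_cases shape.1 (center.1 + r + 1) with ⟨he, _⟩ | ⟨he, _⟩ <;> omega
    have hxr : -r ≤ x ∧ x < r + 1 := by
      constructor
      · rcases max_cases 0 (center.1 - r) with ⟨he, _⟩ | ⟨he, _⟩ <;> omega
      · rcases min_cases shape.1 (center.1 + r + 1) with ⟨he, _⟩ | ⟨he, _⟩ <;> omega
    have hr : 0 ≤ r := by omega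
    have hrx : 0 ≤ r * r - x * x := by nlinarith [hxr.1, hxr.2]
    have hmy0 : 0 ≤ pyIsqrt (r * r - x * x) := pv_isqrt_nonneg _
    have hmyr : pyIsqrt (r * r - x * x) ≤ r := pv_isqrt_le r _ hr (by nlinarith)
    apply pv_flatMap_clip (-r) (r + 1)
      (max 0 (center.2.1 - pyIsqrt (r * r - x * x)) - center.2.1)
      (min shape.2.1 (center.2.1 + pyIsqrt (r * r - x * x) + 1) - center.2.1)
      (by rcases max_cases 0 (center.2.1 - pyIsqrt (r * r - x * x)) with ⟨h, _⟩ | ⟨h, _⟩ <;> omega)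
      (by rcases min_cases shape.2.1 (center.2.1 + pyIsqrt (r * r - x * x) + 1) with ⟨h, _⟩ | ⟨h, _⟩ <;> omega)
    · -- y outside: either the y-clip fails, or y² > r² - x² and the sphere test fails
      intro y hy1 hy2 hy3
      apply List.flatMap_eq_nil_iff.mpr
      intro z _
      have hcy : center.2.1 + y < 0 ∨ shape.2.1 ≤ center.2.1 + y ∨ r * r - x * x < y * y := by
        rcases hy3 with h | h
        · rcases max_cases 0 (center.2.1 - pyIsqrt (r * r - x * x)) with ⟨he, _⟩ | ⟨he, _⟩
          · left; omega
          · right; right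
            have : y < -pyIsqrt (r * r - x * x) := by omega
            by_contra hc
            push Not at hc
            have := (pv_sq_le_iff (r * r - x * x) y hrx).mp hc
            omega
        · rcases min_cases shape.2.1 (center.2.1 + pyIsqrt (r * r - x * x) + 1) with ⟨he, _⟩ | ⟨he, _⟩
          · right; left; omega
          · right; right
            have : pyIsqrt (r * r - x * x) < y := by omega
            by_contra hc
            push Not at hc
            have := (pv_sq_le_iff (r * r - x * x) y hrx).mp hc
            omega
      rcases hcy with h | h | h
      · simp only [pvClip]; split_ifs <;> first | rfl | omega
      · simp only [pvClip]; split_ifs <;> first | rfl | omega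
      · rw [if_neg]; intro hc; nlinarith [sq_nonneg z, hc]
    · -- y inside: recurse on z
      intro y hy1 hy2
      have hcy0 : 0 ≤ center.2.1 + y := by
        rcases max_cases 0 (center.2.1 - pyIsqrt (r * r - x * x)) with ⟨he, _⟩ | ⟨he, _⟩ <;> omega
      have hcy1 : center.2.1 + y < shape.2.1 := by
        rcases min_cases shape.2.1 (center.2.1 + pyIsqrt (r * r - x * x) + 1) with ⟨he, _⟩ | ⟨he, _⟩ <;> omega
      have hym : -pyIsqrt (r * r - x * x) ≤ y ∧ y ≤ pyIsqrt (r * r - x * x) := by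
        constructor
        · rcases max_cases 0 (center.2.1 - pyIsqrt (r * r - x * x)) with ⟨he, _⟩ | ⟨he, _⟩ <;> omega
        · rcases min_cases shape.2.1 (center.2.1 + pyIsqrt (r * r - x * x) + 1) with ⟨he, _⟩ | ⟨he, _⟩ <;> omega
      have hyy : y * y ≤ r * r - x * x := (pv_sq_le_iff (r * r - x * x) y hrx).mpr hym
      have hry : 0 ≤ r * r - x * x - y * y := by omega
      have hmz0 : 0 ≤ pyIsqrt (r * r - x * x - y * y) := pv_isqrt_nonneg _
      have hmzr : pyIsqrt (r * r - x * x - y * y) ≤ r := pv_isqrt_le r _ hr (by nlinarith)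
      apply pv_flatMap_clip (-r) (r + 1)
        (max 0 (center.2.2 - pyIsqrt (r * r - x * x - y * y)) - center.2.2)
        (min shape.2.2 (center.2.2 + pyIsqrt (r * r - x * x - y * y) + 1) - center.2.2)
        (by rcases max_cases 0 (center.2.2 - pyIsqrt (r * r - x * x - y * y)) with ⟨h, _⟩ | ⟨h, _⟩ <;> omega)
        (by rcases min_cases shape.2.2 (center.2.2 + pyIsqrt (r * r - x * x - y * y) + 1) with ⟨h, _⟩ | ⟨h, _⟩ <;> omega)
      · -- z outside: either the z-clip fails, or z² > r² - x² - y² and the sphere test fails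
        intro z hz1 hz2 hz3
        have hcz : center.2.2 + z < 0 ∨ shape.2.2 ≤ center.2.2 + z ∨ r * r - x * x - y * y < z * z := by
          rcases hz3 with h | h
          · rcases max_cases 0 (center.2.2 - pyIsqrt (r * r - x * x - y * y)) with ⟨he, _⟩ | ⟨he, _⟩
            · left; omega
            · right; right
              have : z < -pyIsqrt (r * r - x * x - y * y) := by omega
              by_contra hc
              push Not at hc
              have := (pv_sq_le_iff (r * r - x * x - y * y) z hry).mp hc
              omega
          · rcases min_cases shape.2.2 (center.2.2 + pyIsqrt (r * r - x * x - y * y) + 1) with ⟨he, _⟩ | ⟨he, _⟩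
            · right; left; omega
            · right; right
              have : pyIsqrt (r * r - x * x - y * y) < z := by omega
              by_contra hc
              push Not at hc
              have := (pv_sq_le_iff (r * r - x * x - y * y) z hry).mp hc
              omega
        rcases hcz with h | h | h
        · simp only [pvClip]; split_ifs <;> first | rfl | omega
        · simp only [pvClip]; split_ifs <;> first | rfl | omega
        · rw [if_neg]; intro hc; nlinarith [hc]
      · -- z inside: both tests hold, and both sides emit exactly one point
        intro z hz1 hz2
        have hcz0 : 0 ≤ center.2.2 + z := by
          rcases max_cases 0 (center.2.2 - pyIsqrt (r * r - x * x - y * y)) with ⟨he, _⟩ | ⟨he, _⟩ <;> omega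
        have hcz1 : center.2.2 + z < shape.2.2 := by
          rcases min_cases shape.2.2 (center.2.2 + pyIsqrt (r * r - x * x - y * y) + 1) with ⟨he, _⟩ | ⟨he, _⟩ <;> omega
        have hzm : -pyIsqrt (r * r - x * x - y * y) ≤ z ∧ z ≤ pyIsqrt (r * r - x * x - y * y) := by
          constructor
          · rcases max_cases 0 (center.2.2 - pyIsqrt (r * r - x * x - y * y)) with ⟨he, _⟩ | ⟨he, _⟩ <;> omega
          · rcases min_cases shape.2.2 (center.2.2 + pyIsqrt (r * r - x * x - y * y) + 1) with ⟨he, _⟩ | ⟨he, _⟩ <;> omega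
        have hzz : z * z ≤ r * r - x * x - y * y := (pv_sq_le_iff (r * r - x * x - y * y) z hry).mpr hzm
        rw [if_pos (by nlinarith [hzz])]
        simp only [pvClip]
        rw [if_pos ⟨hcx0, hcx1, hcy0, hcy1, hcz0, hcz1⟩]
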